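-- pv_equiv track=rewrite | github.com/angr/angr | angr/analyses/decompiler/ssailification/traversal_state.py | has_conflicting_value_types
-- ===== SOURCE A (Python) =====
-- from typing import TYPE_CHECKING, TypeAlias
--
-- Value: TypeAlias = "set[tuple[int | None, int]]"
--
-- def has_conflicting_value_types(vs: Value) -> bool:
--     """
--     Value contains two types of entries: (int, *) that indicates a stack offset, and (None, int) that indicates a
--     constant value. This method returns True if a set of Values contains both types of entries, otherwise False.
--
--     """
--
--     is_spoffset, is_const = False, False
--     for v in vs:
--         if v[0] is not None:
--             is_spoffset = True
--         else:
--             is_const = True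
--         if is_spoffset and is_const:
--             return True
--     return False
-- ===== SOURCE B (Python) =====
-- def has_conflicting_value_types(vs) -> bool:
--     return any(v[0] is not None for v in vs) and any(v[0] is None for v in vs)
-- ===== Notes on version B (the rewrite author's own statement) =====
-- stated objective: idiomatic
-- what changed: Replaces the single fused loop maintaining two flags with early return by two independent short-circuiting any() existence checks combined with and.
import Mathlib
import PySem

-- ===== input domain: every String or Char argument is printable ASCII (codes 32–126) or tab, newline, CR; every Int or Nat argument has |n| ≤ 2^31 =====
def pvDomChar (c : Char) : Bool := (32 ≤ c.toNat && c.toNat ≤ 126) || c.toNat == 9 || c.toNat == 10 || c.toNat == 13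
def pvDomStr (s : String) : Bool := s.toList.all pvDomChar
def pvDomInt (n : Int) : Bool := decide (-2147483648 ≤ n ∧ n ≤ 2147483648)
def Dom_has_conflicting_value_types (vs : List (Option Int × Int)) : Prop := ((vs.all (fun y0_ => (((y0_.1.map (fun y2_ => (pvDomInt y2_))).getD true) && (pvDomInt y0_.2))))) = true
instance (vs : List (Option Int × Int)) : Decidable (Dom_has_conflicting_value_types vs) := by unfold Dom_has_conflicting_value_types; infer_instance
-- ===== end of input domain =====

-- B replaces A's single fused two-flag loop by two independent short-circuiting existence
-- checks (objective: idiomatic).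

-- ===== PORT A =====
-- literal port of A's loop: two boolean flags, early return when both are set
def hcvtLoop (vs : List (Option Int × Int)) (is_spoffset is_const : Bool) : Bool :=
  match vs with
  | [] => false
  | v :: rest =>
    let is_spoffset := if v.1.isSome then true else is_spoffset
    let is_const := if v.1.isSome then is_const else true
    if is_spoffset && is_const then true
    else hcvtLoop rest is_spoffset is_const

def has_conflicting_value_types (vs : List (Option Int × Int)) : Bool :=
  hcvtLoop vs false false

-- ===== PORT B =====
def has_conflicting_value_types_alt (vs : List (Option Int × Int)) : Bool :=
  (vs.any (fun v => v.1.isSome)) && (vs.any (fun v => !v.1.isSome))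

-- ===== PRECONDITION & SPEC =====
def Spec_has_conflicting_value_types (vs : List (Option Int × Int)) (out : Bool) : Prop := out = has_conflicting_value_types_alt vs
instance (vs : List (Option Int × Int)) (out : Bool) : Decidable (Spec_has_conflicting_value_types vs out) := by unfold Spec_has_conflicting_value_types; infer_instance

-- ===== CLAIM (what is proved, stated in full; the proofs are below) =====
def Claim_equal_has_conflicting_value_types : Prop := ∀ (vs : List (Option Int × Int)), Dom_has_conflicting_value_types vs → Spec_has_conflicting_value_types vs (has_conflicting_value_types vs)

-- ===== LEMMAS AND PROOFS =====
-- loop invariant: with flags a, c entering, the loop returns true iff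
-- (a or an spoffset exists in the rest) and (c or a const exists in the rest)
theorem hcvtLoop_eq (vs : List (Option Int × Int)) (a c : Bool) (hac : (a && c) = false) :
    hcvtLoop vs a c = ((a || vs.any (fun v => v.1.isSome)) && (c || vs.any (fun v => !v.1.isSome))) := by
  induction vs generalizing a c with
  | nil => simpa [hcvtLoop] using hac
  | cons v rest ih =>
    simp only [hcvtLoop, List.any_cons]
    by_cases h : v.1.isSome <;> cases a <;> cases c <;> simp_all

-- ===== VERDICT (by name: the statement is the Claim_ definition above) =====
theorem has_conflicting_value_types_spec : Claim_equal_has_conflicting_value_types := by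
  intro vs _
  show _ = _
  simp [has_conflicting_value_types, has_conflicting_value_types_alt, hcvtLoop_eq]
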